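-- pv_equiv track=rewrite | github.com/tnstsmsk/projector | hw8.py | cats_heats
-- ===== SOURCE A (Python) =====
-- def cats_heats(numb_cat, rounds):
--     cats = {}
--     result = []
--
--     for n in range(numb_cat):
--         cats[n] = 0
--
--     steps = list(cats.keys())
--
--     for i in range(rounds):
--         if i >= 1:
--             list_cats = steps[i::i]
--             for k in cats.keys():
--                 if k in list_cats:
--                     if cats[k] == 0:
--                         cats[k] = 1
--                     else:
--                         cats[k] = 0
--
--     [result.append(k) for k, v in cats.items() if v == 1]
--
--     return result
-- ===== SOURCE B (Python) =====
-- def cats_heats(numb_cat, rounds):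
--     out = []
--     for k in range(1, numb_cat):
--         c = 0
--         for i in range(1, min(rounds, k + 1)):
--             if k % i == 0:
--                 c += 1
--         if c % 2 == 1:
--             out.append(k)
--     return out
-- ===== Notes on version B (the rewrite author's own statement) =====
-- stated objective: faster
-- what changed: Replaces the dict of toggled flags updated by repeated slice-membership scans over all rounds with a direct per-cat count of its divisors below rounds (capped at the cat's own value), keeping a cat iff that count is odd.
import Mathlib
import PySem

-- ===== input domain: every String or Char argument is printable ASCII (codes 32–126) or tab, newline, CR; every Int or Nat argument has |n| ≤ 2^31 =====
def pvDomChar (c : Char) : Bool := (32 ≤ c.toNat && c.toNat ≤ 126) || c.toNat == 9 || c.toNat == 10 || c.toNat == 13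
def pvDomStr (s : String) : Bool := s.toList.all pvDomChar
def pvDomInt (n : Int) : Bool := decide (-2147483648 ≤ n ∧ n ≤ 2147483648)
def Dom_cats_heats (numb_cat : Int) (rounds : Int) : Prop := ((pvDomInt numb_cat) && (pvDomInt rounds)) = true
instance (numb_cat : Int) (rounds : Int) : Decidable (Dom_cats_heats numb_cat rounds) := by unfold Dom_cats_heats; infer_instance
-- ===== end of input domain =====

-- B computes each cat's parity of divisors below `rounds` directly instead of A's repeated dict toggling via slice membership; measurably faster on large inputs.
-- ===== PORT A =====
def cats_heats (numb_cat : Int) (rounds : Int) : List Int :=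
  let cats : PySem.Dict Int Int :=
    (PySem.List.pyRange 0 numb_cat 1).foldl (fun cats n => cats.insert n 0) PySem.Dict.empty
  let steps : List Int := cats.keys
  let cats :=
    (PySem.List.pyRange 0 rounds 1).foldl (fun cats i =>
      if 1 ≤ i then
        let list_cats : List Int := (PySem.List.slice? steps (some i) none i).getD []
        cats.keys.foldl (fun cats k =>
          if k ∈ list_cats then
            if cats.getD k 0 = 0 then cats.insert k 1 else cats.insert k 0
          else cats) cats
      else cats) cats
  ((cats.items.filter (fun kv => kv.2 == 1)).map (fun kv => kv.1))

-- ===== PORT B =====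
def cats_heats_alt (numb_cat : Int) (rounds : Int) : List Int :=
  (PySem.List.pyRange 1 numb_cat 1).foldl (fun out k =>
    if PySem.Int.mod
        ((PySem.List.pyRange 1 (min rounds (k + 1)) 1).foldl
          (fun c i => if PySem.Int.mod k i = 0 then c + 1 else c) 0) 2 = 1
    then out ++ [k] else out) []

-- ===== PRECONDITION & SPEC =====
def Spec_cats_heats (numb_cat : Int) (rounds : Int) (out : List Int) : Prop := out = cats_heats_alt numb_cat rounds
instance (numb_cat : Int) (rounds : Int) (out : List Int) : Decidable (Spec_cats_heats numb_cat rounds out) := by unfold Spec_cats_heats; infer_instance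

-- ===== CLAIM (what is proved, stated in full; the proofs are below) =====
def Claim_equal_cats_heats : Prop := ∀ (numb_cat : Int) (rounds : Int), Dom_cats_heats numb_cat rounds → Spec_cats_heats numb_cat rounds (cats_heats numb_cat rounds)

-- ===== LEMMAS AND PROOFS =====

-- dict with keys ks and value w k at each key k
def pvMkD (ks : List Int) (w : Int → Int) : PySem.Dict Int Int := ⟨ks.map fun k => (k, w k)⟩

theorem pvMkD_keys (ks : List Int) (w : Int → Int) : (pvMkD ks w).keys = ks := by
  simp only [pvMkD, PySem.Dict.keys, List.map_map]
  rw [show ((fun x : Int × Int => x.1) ∘ fun k => (k, w k)) = id from rfl, List.map_id]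

theorem pvMkD_congr (ks : List Int) {w1 w2 : Int → Int} (h : ∀ k ∈ ks, w1 k = w2 k) :
    pvMkD ks w1 = pvMkD ks w2 := by
  apply PySem.Dict.ext
  simp only [pvMkD]
  exact List.map_congr_left (fun k hk => by rw [h k hk])

theorem pvMkD_getD (ks : List Int) (w : Int → Int) (hnd : ks.Nodup) {k : Int} (hk : k ∈ ks) :
    (pvMkD ks w).getD k 0 = w k := by
  apply PySem.Dict.getD_of_mem_items
  · simp only [pvMkD, PySem.Dict.items]
    exact List.mem_map.mpr ⟨k, hk, rfl⟩
  · simpa [pvMkD_keys] using hnd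

theorem pvMkD_insert (ks : List Int) (w : Int → Int) {a : Int} (ha : a ∈ ks) (v : Int) :
    (pvMkD ks w).insert a v = pvMkD ks (fun k => if k = a then v else w k) := by
  apply PySem.Dict.ext
  rw [PySem.Dict.items_insert_of_contains]
  · simp only [pvMkD, List.map_map]
    apply List.map_congr_left
    intro k hk
    by_cases h : k = a
    · subst h; simp
    · simp [h]
  · rw [PySem.Dict.contains_iff_mem_keys, pvMkD_keys]; exact ha

theorem pvInit (n : Int) :
    (PySem.List.pyRange 0 n 1).foldl (fun cats k => cats.insert k 0) PySem.Dict.empty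
      = pvMkD (PySem.List.pyRange 0 n 1) (fun _ => 0) := by
  apply PySem.Dict.ext
  have h := PySem.Dict.items_foldl_insert_fresh (PySem.List.pyRange 0 n 1)
      (fun k => k) (fun _ => (0 : Int)) PySem.Dict.empty
      (by intro a _; simp [PySem.Dict.contains_empty])
      (by simpa using PySem.List.nodup_pyRange_one 0 n)
  simpa [pvMkD, PySem.Dict.empty] using h

theorem pvMemRange (i n k : Int) (hi : 0 < i) :
    k ∈ PySem.List.pyRange i n i ↔ (i ≤ k ∧ k < n ∧ i ∣ k) := by
  rw [PySem.List.mem_pyRange_iff_of_pos hi]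
  constructor
  · rintro ⟨h1, h2, h3⟩
    exact ⟨h1, h2, by simpa using dvd_add h3 (dvd_refl i)⟩
  · rintro ⟨h1, h2, h3⟩
    exact ⟨h1, h2, dvd_sub h3 (dvd_refl i)⟩

theorem pvSlice (n i : Int) (hi : 1 ≤ i) :
    (PySem.List.slice? (PySem.List.pyRange 0 n 1) (some i) none i).getD []
      = PySem.List.pyRange i n i := by
  have hi0 : ¬ (i = 0) := by omega
  have hineg : ¬ (i < 0) := by omega
  have hipos : (0:Int) < i := by omega
  have hlen : (PySem.List.pyRange 0 n 1).length = n.toNat := by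
    simpa using PySem.List.length_pyRange_one 0 n
  rw [PySem.List.slice?, PySem.List.sliceIndices]
  simp only [hi0, if_false, hineg, hlen, hipos, if_pos, Option.getD_some]
  rw [PySem.List.pyRange_of_pos i n hipos]
  by_cases hin : i < n
  · have hnt : (↑n.toNat : Int) = n := Int.toNat_of_nonneg (by omega)
    rw [hnt]
    rw [min_eq_left (le_of_lt hin)]
    simp only [if_pos hin]
    have hmem : ∀ x ∈ List.range ((n - i + i - 1) / i).toNat,
        (PySem.List.pyRange 0 n)[(i + i * (x:Int)).toNat]? = some (i + i * (x:Int)) := by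
      intro x hx
      have hx' : x < ((n - i + i - 1) / i).toNat := List.mem_range.mp hx
      have hnum : n - i + i - 1 = n - 1 := by ring
      rw [hnum] at hx'
      have hxi : (x:Int) + 1 ≤ (n - 1) / i := by omega
      have hmul : ((x:Int) + 1) * i ≤ n - 1 := (Int.le_ediv_iff_mul_le hipos).mp hxi
      have hx0 : 0 ≤ i * (x:Int) := mul_nonneg (by omega) (by positivity)
      have hub : i + i * (x:Int) ≤ n - 1 := by nlinarith
      rw [PySem.List.getElem?_pyRange_one 0 n]
      rw [if_pos (by omega)]
      congr 1
      omega
    rw [List.filterMap_congr hmem,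
      show (fun x : Nat => some (i + i * (x:Int))) = some ∘ (fun x : Nat => i + i * (x:Int)) from rfl,
      List.filterMap_eq_map]
  · have h1 : min i (↑n.toNat : Int) = ↑n.toNat := min_eq_right (by omega)
    rw [h1]
    simp [hin]

theorem pvInner (lc : List Int) (ks : List Int) (hnd : ks.Nodup) :
    ∀ (l : List Int), l.Nodup → (∀ x ∈ l, x ∈ ks) → ∀ (w : Int → Int),
    l.foldl (fun cats k =>
        if k ∈ lc then
          (if cats.getD k 0 = 0 then cats.insert k 1 else cats.insert k 0)
        else cats) (pvMkD ks w)
      = pvMkD ks (fun k => if k ∈ l ∧ k ∈ lc then (if w k = 0 then 1 else 0) else w k) := by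
  intro l
  induction l with
  | nil =>
    intro _ _ w
    exact pvMkD_congr ks (by intro k _; simp)
  | cons a l ih =>
    intro hndl hsub w
    have ha : a ∈ ks := hsub a (List.mem_cons_self)
    have hal : a ∉ l := (List.nodup_cons.mp hndl).1
    have hndl' : l.Nodup := (List.nodup_cons.mp hndl).2
    have hsub' : ∀ x ∈ l, x ∈ ks := fun x hx => hsub x (List.mem_cons_of_mem a hx)
    rw [List.foldl_cons]
    by_cases hac : a ∈ lc
    · rw [if_pos hac, pvMkD_getD ks w hnd ha]
      by_cases hw0 : w a = 0
      · rw [if_pos hw0, pvMkD_insert ks w ha, ih hndl' hsub']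
        apply pvMkD_congr; intro k _
        by_cases hka : k = a
        · subst hka; simp [hal, hac, hw0]
        · simp [hka]
      · rw [if_neg hw0, pvMkD_insert ks w ha, ih hndl' hsub']
        apply pvMkD_congr; intro k _
        by_cases hka : k = a
        · subst hka; simp [hal, hac, hw0]
        · simp [hka]
    · rw [if_neg hac, ih hndl' hsub']
      apply pvMkD_congr; intro k _
      by_cases hka : k = a
      · subst hka; simp [hal, hac]
      · simp [hka]

def pvTogCnt (n : Int) (is : List Int) (k : Int) : Nat :=
  is.countP (fun i => decide (1 ≤ i ∧ k ∈ PySem.List.pyRange i n i))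

theorem pvOuter (n : Int) :
    ∀ (is : List Int) (w : Int → Int), (∀ k, w k = 0 ∨ w k = 1) →
    is.foldl (fun cats i =>
        if 1 ≤ i then
          let list_cats : List Int :=
            (PySem.List.slice? (PySem.List.pyRange 0 n 1) (some i) none i).getD []
          cats.keys.foldl (fun cats k =>
            if k ∈ list_cats then
              (if cats.getD k 0 = 0 then cats.insert k 1 else cats.insert k 0)
            else cats) cats
        else cats) (pvMkD (PySem.List.pyRange 0 n 1) w)
      = pvMkD (PySem.List.pyRange 0 n 1)
          (fun k => if pvTogCnt n is k % 2 = 0 then w k else (if w k = 0 then 1 else 0)) := by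
  intro is
  induction is with
  | nil =>
    intro w hw
    exact pvMkD_congr _ (by intro k _; simp [pvTogCnt])
  | cons i is ih =>
    intro w hw
    rw [List.foldl_cons]
    by_cases hi : (1:Int) ≤ i
    · simp only [if_pos hi, pvSlice n i hi, pvMkD_keys]
      rw [pvInner (PySem.List.pyRange i n i) (PySem.List.pyRange 0 n 1)
            (PySem.List.nodup_pyRange_one 0 n) (PySem.List.pyRange 0 n 1)
            (PySem.List.nodup_pyRange_one 0 n) (fun x hx => hx)]
      rw [ih _ (by
        intro k
        by_cases h : (k ∈ PySem.List.pyRange 0 n 1 ∧ k ∈ PySem.List.pyRange i n i)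
        · rw [if_pos h]; by_cases h2 : w k = 0 <;> simp [h2]
        · rw [if_neg h]; exact hw k)]
      apply pvMkD_congr; intro k hk
      have hc : pvTogCnt n (i :: is) k
          = pvTogCnt n is k + (if (1 ≤ i ∧ k ∈ PySem.List.pyRange i n i) then 1 else 0) := by
        simp [pvTogCnt, List.countP_cons]
      by_cases hm : k ∈ PySem.List.pyRange i n i
      · have hpk : (1 ≤ i ∧ k ∈ PySem.List.pyRange i n i) := ⟨hi, hm⟩
        have hw' : (if (k ∈ PySem.List.pyRange 0 n 1 ∧ k ∈ PySem.List.pyRange i n i)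
            then (if w k = 0 then (1:Int) else 0) else w k) = (if w k = 0 then 1 else 0) :=
          if_pos ⟨hk, hm⟩
        rw [hc, if_pos hpk, hw']
        rcases hw k with hv | hv <;> rw [hv] <;>
          by_cases he : pvTogCnt n is k % 2 = 0 <;>
            simp [he, Nat.add_mod] <;> omega
      · have hw' : (if (k ∈ PySem.List.pyRange 0 n 1 ∧ k ∈ PySem.List.pyRange i n i)
            then (if w k = 0 then (1:Int) else 0) else w k) = w k :=
          if_neg (fun hp => hm hp.2)
        have h0 : (if (1 ≤ i ∧ k ∈ PySem.List.pyRange i n i) then 1 else 0) = 0 :=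
          if_neg (fun hp => hm hp.2)
        rw [hc, h0, Nat.add_zero, hw']
    · rw [if_neg hi, ih w hw]
      apply pvMkD_congr; intro k _
      have hc : pvTogCnt n (i :: is) k = pvTogCnt n is k := by
        simp [pvTogCnt, List.countP_cons, hi]
      rw [hc]

theorem pvFilterSnd (F : Int → Int) (l : List Int) :
    List.map (fun kv : Int × Int => kv.1)
      (List.filter (fun kv : Int × Int => kv.2 == 1) (List.map (fun k => (k, F k)) l))
    = List.filter (fun k => F k == 1) l := by
  induction l with
  | nil => rfl
  | cons a l ih => by_cases h : F a == 1 <;> simp [List.filter_cons, h, ih]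

theorem pvA_eq (n r : Int) :
    cats_heats n r = (PySem.List.pyRange 0 n 1).filter
      (fun k => decide (pvTogCnt n (PySem.List.pyRange 0 r 1) k % 2 = 1)) := by
  simp only [cats_heats]
  rw [pvInit, pvMkD_keys]
  rw [pvOuter n (PySem.List.pyRange 0 r 1) (fun _ => 0) (fun _ => Or.inl rfl)]
  simp only [pvMkD]
  rw [pvFilterSnd]
  apply List.filter_congr
  intro k _
  by_cases he : pvTogCnt n (PySem.List.pyRange 0 r 1) k % 2 = 0 <;> simp [he] <;> omega

theorem pvCnt_fold (k : Int) :
    ∀ (l : List Int) (c : Int),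
    l.foldl (fun c i => if PySem.Int.mod k i = 0 then c + 1 else c) c
      = c + (l.countP (fun i => decide (PySem.Int.mod k i = 0)) : Int) := by
  intro l
  induction l with
  | nil => intro c; simp
  | cons a l ih =>
    intro c
    by_cases h : PySem.Int.mod k a = 0
    · simp only [List.foldl_cons, if_pos h, ih, List.countP_cons, h]
      simp; push_cast; ring
    · simp [List.foldl_cons, h, ih]

theorem pvFilter_fold (p : Int → Prop) [DecidablePred p] :
    ∀ (l acc : List Int),
    l.foldl (fun out k => if p k then out ++ [k] else out) acc
      = acc ++ l.filter (fun k => decide (p k)) := by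
  intro l
  induction l with
  | nil => intro acc; simp
  | cons a l ih =>
    intro acc
    by_cases h : p a <;> simp [List.foldl_cons, h, ih]

theorem pvMod_zero_iff (a b : Int) (h : 0 < b) : PySem.Int.mod a b = 0 ↔ b ∣ a := by
  show a.fmod b = 0 ↔ b ∣ a
  rw [Int.fmod_eq_emod]; simp [h.le]

theorem pvMod_two (c : Nat) : PySem.Int.mod (c : Int) 2 = 1 ↔ c % 2 = 1 := by
  show (c : Int).fmod 2 = 1 ↔ c % 2 = 1
  rw [Int.fmod_eq_emod]; simp; omega

theorem pvB_eq (n r : Int) :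
    cats_heats_alt n r = (PySem.List.pyRange 1 n 1).filter
      (fun k => decide ((PySem.List.pyRange 1 (min r (k+1)) 1).countP
          (fun i => decide (PySem.Int.mod k i = 0)) % 2 = 1)) := by
  simp only [cats_heats_alt]
  rw [pvFilter_fold (fun k => PySem.Int.mod
      ((PySem.List.pyRange 1 (min r (k+1)) 1).foldl
        (fun c i => if PySem.Int.mod k i = 0 then c + 1 else c) 0) 2 = 1)]
  rw [List.nil_append]
  apply List.filter_congr
  intro k _
  rw [pvCnt_fold k, zero_add]
  simp only [decide_eq_decide]
  exact pvMod_two _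

theorem pvCnt_eq (n r k : Int) (hk1 : 1 ≤ k) (hkn : k < n) :
    pvTogCnt n (PySem.List.pyRange 0 r 1) k
      = (PySem.List.pyRange 1 (min r (k+1)) 1).countP
          (fun i => decide (PySem.Int.mod k i = 0)) := by
  unfold pvTogCnt
  by_cases hr : 0 < r
  · have hm1 : (1:Int) ≤ min r (k+1) := by omega
    rw [PySem.List.pyRange_one_cons (show (0:Int) < r from hr), List.countP_cons]
    have hp0 : ¬ ((1:Int) ≤ 0 ∧ (k ∈ PySem.List.pyRange 0 n 0)) := by
      rintro ⟨h, _⟩; omega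
    rw [if_neg (by simpa using hp0), Nat.add_zero]
    norm_num only
    rw [PySem.List.pyRange_one_append 1 (min r (k+1)) r hm1 (by omega), List.countP_append]
    have htail : (PySem.List.pyRange (min r (k+1)) r 1).countP
        (fun i => decide (1 ≤ i ∧ k ∈ PySem.List.pyRange i n i)) = 0 := by
      apply List.countP_eq_zero.mpr
      intro i hi
      have hmem := PySem.List.mem_pyRange_one.mp hi
      simp only [decide_eq_true_eq]
      rintro ⟨h1, hm⟩
      have := (pvMemRange i n k (by omega)).mp hm
      omega
    rw [htail, Nat.add_zero]
    apply List.countP_congr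
    intro i hi
    have hmem := PySem.List.mem_pyRange_one.mp hi
    have hip : (0:Int) < i := by omega
    simp only [decide_eq_true_eq]
    rw [pvMemRange i n k hip, pvMod_zero_iff k i hip]
    constructor
    · rintro ⟨_, _, _, hd⟩; exact hd
    · intro hd; exact ⟨by omega, ⟨by omega, hkn, hd⟩⟩
  · have h1 : PySem.List.pyRange 0 r 1 = [] := PySem.List.pyRange_one_eq_nil (by omega)
    have h2 : PySem.List.pyRange 1 (min r (k+1)) 1 = [] := PySem.List.pyRange_one_eq_nil (by omega)
    rw [h1, h2]
    simp

-- ===== VERDICT (by name: the statement is the Claim_ definition above) =====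
theorem cats_heats_spec : Claim_equal_cats_heats := by
  intro n r _
  unfold Spec_cats_heats
  rw [pvA_eq, pvB_eq]
  by_cases hn : (0:Int) < n
  · rw [PySem.List.pyRange_one_cons hn, List.filter_cons]
    have h0 : pvTogCnt n (PySem.List.pyRange 0 r 1) 0 = 0 := by
      apply List.countP_eq_zero.mpr
      intro i _
      simp only [decide_eq_true_eq]
      rintro ⟨h1, hm⟩
      have := (pvMemRange i n 0 (by omega)).mp hm
      omega
    rw [h0]
    simp only [Nat.zero_mod, decide_eq_true_eq]
    rw [if_neg (by omega)]
    apply List.filter_congr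
    intro k hk
    have hkm := PySem.List.mem_pyRange_one.mp hk
    rw [pvCnt_eq n r k hkm.1 hkm.2]
  · rw [PySem.List.pyRange_one_eq_nil (by omega : n ≤ 0),
        PySem.List.pyRange_one_eq_nil (by omega : n ≤ 1)]
    simp
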